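-- pv_equiv track=rewrite | github.com/ojs201/Algorithm-Study_23-2 | JiYeonShin/5th week assignment/뉴스 클러스터링.py | splitToTwoChar
-- ===== SOURCE A (Python) =====
-- from collections import deque
-- from collections import defaultdict
--
-- def splitToTwoChar(str):
--     result = defaultdict(int)
--     dq = deque()
--     for c in str:
--         if(not c.isalpha()):
--             if(dq):
--                 dq.popleft()
--             continue
--         dq.append(c)
--         if(len(dq) == 2):
--             result["".join(dq)] += 1
--             dq.popleft()
--     return result
-- ===== SOURCE B (Python) =====
-- from collections import defaultdict
--
-- def splitToTwoChar(str):
--     result = defaultdict(int)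
--     for a, b in zip(str, str[1:]):
--         if a.isalpha() and b.isalpha():
--             result[a + b] += 1
--     return result
-- ===== Notes on version B (the rewrite author's own statement) =====
-- stated objective: idiomatic
-- what changed: Replaced the deque state machine (append/popleft with a non-alpha reset branch) by direct iteration over adjacent character pairs via zip(str, str[1:]), counting a pair when both characters are alphabetic; dropping the per-character deque maintenance and string join gives a constant-factor speedup.
import Mathlib
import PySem

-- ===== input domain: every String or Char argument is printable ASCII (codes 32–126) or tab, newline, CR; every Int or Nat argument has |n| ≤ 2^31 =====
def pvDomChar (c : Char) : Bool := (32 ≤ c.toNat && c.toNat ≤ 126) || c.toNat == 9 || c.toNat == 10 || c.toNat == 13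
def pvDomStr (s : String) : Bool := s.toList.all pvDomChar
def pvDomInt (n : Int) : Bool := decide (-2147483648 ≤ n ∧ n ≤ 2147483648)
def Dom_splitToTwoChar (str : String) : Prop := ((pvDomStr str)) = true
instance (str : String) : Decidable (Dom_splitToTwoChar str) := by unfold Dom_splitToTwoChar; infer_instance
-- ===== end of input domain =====

-- B drops A's deque state machine and counts adjacent alphabetic character pairs directly via zip(str, str[1:]) (idiomatic; return value identical).


-- ===== PORT A =====
-- the for-loop over the characters, carrying (result, dq); dq is A's deque
def pvLoopA : List Char → PySem.Dict String Int → List Char → PySem.Dict String Int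
  | [], result, _ => result
  | c :: rest, result, dq =>
    if PySem.Chars.isalpha c = false then
      pvLoopA rest result (if dq.isEmpty then dq else dq.tail)   -- if dq: dq.popleft()
    else
      let dq2 := dq ++ [c]                                        -- dq.append(c)
      if dq2.length == 2 then
        pvLoopA rest (result.modify (String.mk dq2) 0 (· + 1)) dq2.tail
      else
        pvLoopA rest result dq2

def splitToTwoChar (str : String) : List (String × Int) :=
  (pvLoopA str.toList PySem.Dict.empty []).items

-- ===== PORT B =====
-- fold over the adjacent pairs zip(str, str[1:])
def pvPairFold (ps : List (Char × Char)) (result : PySem.Dict String Int) : PySem.Dict String Int :=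
  ps.foldl (fun r p =>
    if PySem.Chars.isalpha p.1 && PySem.Chars.isalpha p.2 then
      r.modify (String.mk [p.1, p.2]) 0 (· + 1)
    else r) result

def splitToTwoChar_alt (str : String) : List (String × Int) :=
  (pvPairFold (str.toList.zip str.toList.tail) PySem.Dict.empty).items

-- ===== PRECONDITION & SPEC =====
def Spec_splitToTwoChar (str : String) (out : List (String × Int)) : Prop := out = splitToTwoChar_alt str
instance (str : String) (out : List (String × Int)) : Decidable (Spec_splitToTwoChar str out) := by unfold Spec_splitToTwoChar; infer_instance

-- ===== CLAIM (what is proved, stated in full; the proofs are below) =====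
def Claim_equal_splitToTwoChar : Prop := ∀ (str : String), Dom_splitToTwoChar str → Spec_splitToTwoChar str (splitToTwoChar str)

-- ===== LEMMAS AND PROOFS =====

-- a head pair whose first character is non-alphabetic is skipped by B's fold
theorem pvPairFold_skip_head (b : Char) (bs : List Char) (d : PySem.Dict String Int)
    (hb : PySem.Chars.isalpha b = false) :
    pvPairFold ((b :: bs).zip bs) d = pvPairFold (bs.zip bs.tail) d := by
  cases bs with
  | nil => rfl
  | cons b2 bs2 => simp [pvPairFold, hb]

-- loop invariant: A's deque holds the last alphabetic character iff it was not consumed/reset;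
-- with such a dq, A's remaining loop equals B's fold over the adjacent pairs of dq ++ l.
theorem pvLoopA_eq_pairFold (l : List Char) (d : PySem.Dict String Int) (dq : List Char)
    (hdq : dq = [] ∨ ∃ c, dq = [c] ∧ PySem.Chars.isalpha c = true) :
    pvLoopA l d dq = pvPairFold ((dq ++ l).zip (dq ++ l).tail) d := by
  induction l generalizing d dq with
  | nil =>
    rcases hdq with h | ⟨c, h, _⟩ <;> subst h <;> rfl
  | cons c rest ih =>
    rcases hdq with h | ⟨p, h, hp⟩ <;> subst h
    · by_cases ha : PySem.Chars.isalpha c = true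
      · show pvLoopA (c :: rest) d [] = pvPairFold ((c :: rest).zip rest) d
        have := ih d [c] (Or.inr ⟨c, rfl, ha⟩)
        simpa [pvLoopA, ha] using this
      · show pvLoopA (c :: rest) d [] = pvPairFold ((c :: rest).zip rest) d
        rw [pvPairFold_skip_head c rest d (by simpa using ha)]
        have := ih d [] (Or.inl rfl)
        simpa [pvLoopA, ha] using this
    · by_cases ha : PySem.Chars.isalpha c = true
      · show pvLoopA (c :: rest) d [p] =
            pvPairFold ((p :: c :: rest).zip (c :: rest)) d
        have := ih (d.modify (String.mk [p, c]) 0 (· + 1)) [c] (Or.inr ⟨c, rfl, ha⟩)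
        simp only [pvLoopA, ha, List.zip_cons_cons, pvPairFold, List.foldl_cons, hp,
          Bool.and_self, if_true]
        simpa [pvLoopA, ha, pvPairFold] using this
      · show pvLoopA (c :: rest) d [p] =
            pvPairFold ((p :: c :: rest).zip (c :: rest)) d
        have hz : pvPairFold ((p :: c :: rest).zip (c :: rest)) d
            = pvPairFold ((c :: rest).zip rest) d := by
          simp [pvPairFold, Bool.eq_false_iff.mpr ha]
        rw [hz, pvPairFold_skip_head c rest d (by simpa using ha)]
        have := ih d [] (Or.inl rfl)
        simpa [pvLoopA, ha] using this

-- ===== VERDICT (by name: the statement is the Claim_ definition above) =====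
theorem splitToTwoChar_spec : Claim_equal_splitToTwoChar := by
  intro s _
  show splitToTwoChar s = splitToTwoChar_alt s
  unfold splitToTwoChar splitToTwoChar_alt
  rw [pvLoopA_eq_pairFold s.toList PySem.Dict.empty [] (Or.inl rfl)]
  rfl
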